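-- pv_equiv track=rewrite | github.com/Harsha-Reddy21/RAG_Evaluation | RAG_Finance/rag_pipeline.py | _is_real_time_query
-- ===== SOURCE A (Python) =====
-- def _is_real_time_query(question: str) -> bool:
--     """
--     Determine if a query is about real-time/current data
--
--     Args:
--         question: Question text
--
--     Returns:
--         True if the query is about real-time data, False if historical
--     """
--     question_lower = question.lower()
--     real_time_indicators = [
--         "current", "latest", "now", "today", "present", "recent",
--         "this quarter", "this year", "this month", "this week"
--     ]
--
--     for indicator in real_time_indicators:
--         if indicator in question_lower:
--             return True
--
--     return False
-- ===== SOURCE B (Python) =====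
-- _INDICATORS = ("current", "latest", "now", "today", "present", "recent",
--                "this quarter", "this year", "this month", "this week")
--
-- def _is_real_time_query(question: str) -> bool:
--     q = question.lower()
--     return any(q.startswith(_INDICATORS, i) for i in range(len(q) + 1))
-- ===== Notes on version B (the rewrite author's own statement) =====
-- stated objective: alternative
-- what changed: B replaces A's per-indicator loop that rescans the whole string once per keyword with a single left-to-right pass over the string's positions, checking at each position whether any indicator starts there (str.startswith with a tuple and offset), the way a regex alternation automaton would.
import Mathlib
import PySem

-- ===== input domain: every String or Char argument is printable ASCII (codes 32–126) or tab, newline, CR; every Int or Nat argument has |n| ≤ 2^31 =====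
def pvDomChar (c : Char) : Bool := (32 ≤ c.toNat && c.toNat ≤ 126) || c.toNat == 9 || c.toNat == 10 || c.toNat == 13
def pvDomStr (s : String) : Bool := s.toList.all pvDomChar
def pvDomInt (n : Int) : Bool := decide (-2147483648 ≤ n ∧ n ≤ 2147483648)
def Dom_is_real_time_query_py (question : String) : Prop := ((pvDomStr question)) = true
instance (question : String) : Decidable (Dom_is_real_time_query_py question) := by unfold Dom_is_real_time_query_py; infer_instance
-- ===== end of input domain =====

-- B: one left-to-right pass over the string's positions testing all indicators at once,
-- instead of A's per-indicator loop that rescans the string once per keyword (objective: alternative).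


-- ===== PORT A =====
def pvIndicatorStrs : List String :=
  ["current", "latest", "now", "today", "present", "recent",
   "this quarter", "this year", "this month", "this week"]

-- A's for-loop with early return: recursion over the indicator list
def pvLoopA (ql : String) : List String → Bool
  | [] => false
  | i :: rest => if PySem.Str.isIn i ql then true else pvLoopA ql rest

def is_real_time_query_py (question : String) : Bool :=
  pvLoopA (PySem.Str.lower question) pvIndicatorStrs

-- ===== PORT B =====
def pvIndicators : List (List Char) :=
  ["current".toList, "latest".toList, "now".toList, "today".toList, "present".toList,
   "recent".toList, "this quarter".toList, "this year".toList, "this month".toList,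
   "this week".toList]

-- B's single pass: at each position (suffix) test whether any indicator starts there
def pvScanB : List Char → Bool
  | [] => pvIndicators.any (fun p => p.isPrefixOf ([] : List Char))
  | c :: t => pvIndicators.any (fun p => p.isPrefixOf (c :: t)) || pvScanB t

def is_real_time_query_py_alt (question : String) : Bool :=
  pvScanB (PySem.Str.lower question).toList

-- ===== PRECONDITION & SPEC =====
def Spec_is_real_time_query_py (question : String) (out : Bool) : Prop := out = is_real_time_query_py_alt question
instance (question : String) (out : Bool) : Decidable (Spec_is_real_time_query_py question out) := by unfold Spec_is_real_time_query_py; infer_instance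

-- ===== CLAIM (what is proved, stated in full; the proofs are below) =====
def Claim_equal_is_real_time_query_py : Prop := ∀ (question : String), Dom_is_real_time_query_py question → Spec_is_real_time_query_py question (is_real_time_query_py question)

-- ===== LEMMAS AND PROOFS =====

-- A's early-return loop is the disjunction of the membership tests
theorem pvLoopA_eq_any (ql : String) (l : List String) :
    pvLoopA ql l = l.any (fun i => PySem.Str.isIn i ql) := by
  induction l with
  | nil => rfl
  | cons i rest ih =>
      cases h : PySem.Str.isIn i ql <;> simp [pvLoopA, ih]

-- B's scan is true iff some indicator is a prefix of some suffix
theorem pvScanB_iff (cs : List Char) :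
    pvScanB cs = true ↔ ∃ p ∈ pvIndicators, ∃ j, p <+: cs.drop j := by
  induction cs with
  | nil =>
      simp [pvScanB, List.any_eq_true, List.isPrefixOf_iff_prefix]
  | cons c t ih =>
      simp only [pvScanB, Bool.or_eq_true, List.any_eq_true, List.isPrefixOf_iff_prefix, ih]
      constructor
      · rintro (⟨p, hp, hpre⟩ | ⟨p, hp, j, hpre⟩)
        · exact ⟨p, hp, 0, hpre⟩
        · exact ⟨p, hp, j + 1, by simpa using hpre⟩
      · rintro ⟨p, hp, j, hpre⟩
        cases j with
        | zero => exact Or.inl ⟨p, hp, hpre⟩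
        | succ j => exact Or.inr ⟨p, hp, j, by simpa using hpre⟩

theorem pvIndicators_eq : pvIndicators = pvIndicatorStrs.map (fun s => s.toList) := by decide

-- ===== VERDICT (by name: the statement is the Claim_ definition above) =====
theorem is_real_time_query_py_spec : Claim_equal_is_real_time_query_py := by
  intro question _
  unfold Spec_is_real_time_query_py is_real_time_query_py is_real_time_query_py_alt
  set ql := PySem.Str.lower question with hql
  rw [Bool.eq_iff_iff, pvLoopA_eq_any, pvScanB_iff, pvIndicators_eq]
  simp only [List.any_eq_true, List.mem_map, exists_exists_and_eq_and]
  constructor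
  · rintro ⟨i, hi, hIn⟩
    have h := (PySem.Str.isIn_iff_infix i ql).mp hIn
    rcases (PySem.Chars.exists_prefix_drop_iff_isIn i.toList ql.toList).mpr
        ((PySem.Chars.isIn_iff_infix _ _).mpr h) with ⟨j, hj⟩
    exact ⟨i, hi, j, hj⟩
  · rintro ⟨i, hi, j, hj⟩
    refine ⟨i, hi, ?_⟩
    have h := (PySem.Chars.exists_prefix_drop_iff_isIn i.toList ql.toList).mp ⟨j, hj⟩
    exact (PySem.Str.isIn_iff_infix i ql).mpr ((PySem.Chars.isIn_iff_infix _ _).mp h)
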